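-- pv_equiv track=rewrite | github.com/geradivij/Luke-os | luke.py | fuzzy_match_window
-- ===== SOURCE A (Python) =====
-- def fuzzy_match_window(target: str, windows: list[dict]) -> dict | None:
--     t = target.lower().strip()
--     for w in windows:
--         if t == w["name"].lower() or t == w["owner"].lower():
--             return w
--     for w in windows:
--         if t in w["name"].lower() or t in w["owner"].lower():
--             return w
--     return None
-- ===== SOURCE B (Python) =====
-- def fuzzy_match_window(target: str, windows: list[dict]) -> dict | None:
--     t = target.lower().strip()
--     best = None  # (is_exact, window); scanning right-to-left keeps the leftmost of each rank
--     for w in reversed(windows):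
--         n, o = w["name"].lower(), w["owner"].lower()
--         if t == n or t == o:
--             best = (True, w)
--         elif (best is None or not best[0]) and (t in n or t in o):
--             best = (False, w)
--     return best[1] if best else None
-- ===== Notes on version B (the rewrite author's own statement) =====
-- stated objective: alternative
-- what changed: Replaces A's two forward scans (exact pass, then substring pass) with a single backward scan over reversed(windows) maintaining one ranked accumulator (is_exact, window), so the leftmost exact match, else the leftmost substring match, survives the fold; no early return.
-- outside the precondition, e.g. on fuzzy_match_window('a', [{'name': 'a'}]): A returns {'name': 'a'}, B raises KeyError
import Mathlib
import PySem

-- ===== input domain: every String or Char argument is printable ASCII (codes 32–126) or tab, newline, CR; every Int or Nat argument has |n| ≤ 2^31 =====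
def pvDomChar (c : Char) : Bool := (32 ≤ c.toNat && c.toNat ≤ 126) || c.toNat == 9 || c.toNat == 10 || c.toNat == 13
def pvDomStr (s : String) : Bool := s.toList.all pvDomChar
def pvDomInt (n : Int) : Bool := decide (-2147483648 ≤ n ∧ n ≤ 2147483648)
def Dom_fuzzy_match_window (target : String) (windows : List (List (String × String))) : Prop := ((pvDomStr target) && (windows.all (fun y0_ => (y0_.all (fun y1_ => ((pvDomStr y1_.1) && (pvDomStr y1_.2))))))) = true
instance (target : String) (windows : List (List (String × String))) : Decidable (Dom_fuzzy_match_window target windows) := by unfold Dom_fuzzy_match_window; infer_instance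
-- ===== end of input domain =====

-- B replaces A's two forward scans with ONE backward scan (fold over the reversed
-- list) keeping a ranked accumulator (isExact, window); return value only.


-- dict lookup w[k] = first match in the association list (exact for a Python dict,
-- whose keys are unique); the .getD "" default is never reached inside Pre_,
-- which requires both keys to be present.
def pvGetKey (w : List (String × String)) (k : String) : String :=
  (w.lookup k).getD ""

-- ===== PORT A =====
-- first loop of A: return the first window whose lowered name or owner equals t
def pvAExact (t : String) : List (List (String × String)) → Option (List (String × String))
  | [] => none
  | w :: rest =>
    if t == PySem.Str.lower (pvGetKey w "name") || t == PySem.Str.lower (pvGetKey w "owner") then some w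
    else pvAExact t rest

-- second loop of A: return the first window whose lowered name or owner contains t
def pvASub (t : String) : List (List (String × String)) → Option (List (String × String))
  | [] => none
  | w :: rest =>
    if PySem.Str.isIn t (PySem.Str.lower (pvGetKey w "name")) || PySem.Str.isIn t (PySem.Str.lower (pvGetKey w "owner")) then some w
    else pvASub t rest

def fuzzy_match_window (target : String) (windows : List (List (String × String))) : Option (List (String × String)) :=
  let t := PySem.Str.strip (PySem.Str.lower target)
  match pvAExact t windows with
  | some w => some w
  | none => pvASub t windows

-- ===== PORT B =====
-- one step of B's backward loop: the body of `for w in reversed(windows)`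
def pvBStep (t : String) (best : Option (Bool × List (String × String))) (w : List (String × String)) : Option (Bool × List (String × String)) :=
  let n := PySem.Str.lower (pvGetKey w "name")
  let o := PySem.Str.lower (pvGetKey w "owner")
  if t == n || t == o then some (true, w)
  else if (match best with | none => true | some b => !b.1) && (PySem.Str.isIn t n || PySem.Str.isIn t o) then some (false, w)
  else best

def fuzzy_match_window_alt (target : String) (windows : List (List (String × String))) : Option (List (String × String)) :=
  let t := PySem.Str.strip (PySem.Str.lower target)
  match windows.reverse.foldl (pvBStep t) none with
  | some b => some b.2
  | none => none

-- ===== PRECONDITION & SPEC =====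
-- Pre_ excludes window lists in which some window lacks a "name" or "owner" key: Python A raises KeyError on these, except when an exact name match short-circuits before the missing lookup, where A returns but B's eager per-window key lookups raise KeyError.
def Pre_fuzzy_match_window (target : String) (windows : List (List (String × String))) : Prop :=
  windows.all (fun w => ((w.lookup "name").isSome && (w.lookup "owner").isSome)) = true
instance (target : String) (windows : List (List (String × String))) : Decidable (Pre_fuzzy_match_window target windows) := by unfold Pre_fuzzy_match_window; infer_instance

def pvWitness_fuzzy_match_window : String × (List (List (String × String))) :=
  ("Fire", [[("name", "Firefox"), ("owner", "mozilla")], [("name", "Terminal"), ("owner", "root")]])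

def Spec_fuzzy_match_window (target : String) (windows : List (List (String × String))) (out : Option (List (String × String))) : Prop := out = fuzzy_match_window_alt target windows
instance (target : String) (windows : List (List (String × String))) (out : Option (List (String × String))) : Decidable (Spec_fuzzy_match_window target windows out) := by unfold Spec_fuzzy_match_window; infer_instance

-- ===== CLAIM (what is proved, stated in full; the proofs are below) =====
def Claim_equal_fuzzy_match_window : Prop := ∀ (target : String) (windows : List (List (String × String))), Dom_fuzzy_match_window target windows → Pre_fuzzy_match_window target windows → Spec_fuzzy_match_window target windows (fuzzy_match_window target windows)

-- ===== LEMMAS AND PROOFS =====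

-- folding B's step backwards over the list computes "leftmost exact match,
-- ranked above leftmost substring match", i.e. A's two passes combined
theorem pvFoldr_eq (t : String) (ws : List (List (String × String))) :
    List.foldr (fun w r => pvBStep t r w) none ws =
      match pvAExact t ws with
      | some w => some (true, w)
      | none => (pvASub t ws).map (fun w => (false, w)) := by
  induction ws with
  | nil => rfl
  | cons w rest ih =>
    simp only [List.foldr, ih]
    by_cases hx : (t == PySem.Str.lower (pvGetKey w "name") || t == PySem.Str.lower (pvGetKey w "owner")) = true
    · simp only [pvBStep, pvAExact]
      rw [if_pos hx, if_pos hx]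
    · by_cases hs : (PySem.Str.isIn t (PySem.Str.lower (pvGetKey w "name")) || PySem.Str.isIn t (PySem.Str.lower (pvGetKey w "owner"))) = true
      · cases hAe : pvAExact t rest with
        | some x =>
          simp only [pvBStep, pvAExact, hAe]
          rw [if_neg hx, if_neg hx, if_neg (by simp)]
        | none =>
          cases hAs : pvASub t rest with
          | some y =>
            simp only [pvBStep, pvAExact, pvASub, hAe, hAs, Option.map]
            rw [if_neg hx, if_neg hx, if_pos (by simp only [Bool.not_false, Bool.true_and]; exact hs), if_pos hs]
          | none =>
            simp only [pvBStep, pvAExact, pvASub, hAe, hAs, Option.map]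
            rw [if_neg hx, if_neg hx, if_pos (by simp only [Bool.true_and]; exact hs), if_pos hs]
      · cases hAe : pvAExact t rest with
        | some x =>
          simp only [pvBStep, pvAExact, hAe]
          rw [if_neg hx, if_neg hx, if_neg (by simp)]
        | none =>
          cases hAs : pvASub t rest with
          | some y =>
            simp only [pvBStep, pvAExact, pvASub, hAe, hAs, Option.map]
            rw [if_neg hx, if_neg hx, if_neg (by simp only [Bool.not_false, Bool.true_and]; exact hs), if_neg hs]
          | none =>
            simp only [pvBStep, pvAExact, pvASub, hAe, hAs, Option.map]
            rw [if_neg hx, if_neg hx, if_neg (by simp only [Bool.true_and]; exact hs), if_neg hs]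

-- ===== VERDICT (by name: the statement is the Claim_ definition above) =====
theorem fuzzy_match_window_spec : Claim_equal_fuzzy_match_window := by
  intro target windows _ _
  show (match pvAExact (PySem.Str.strip (PySem.Str.lower target)) windows with
        | some w => some w
        | none => pvASub (PySem.Str.strip (PySem.Str.lower target)) windows) =
      (match windows.reverse.foldl (pvBStep (PySem.Str.strip (PySem.Str.lower target))) none with
        | some b => some b.2
        | none => none)
  rw [List.foldl_reverse, pvFoldr_eq]
  cases pvAExact (PySem.Str.strip (PySem.Str.lower target)) windows <;>
    cases pvASub (PySem.Str.strip (PySem.Str.lower target)) windows <;> simp
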